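-- pv_equiv track=rewrite | github.com/BrianRyan94/whatbitcoinwilldo | whatbtcwilldo/api/utils.py | acceptable_hour_values
-- ===== SOURCE A (Python) =====
-- def acceptable_hour_values(end_hour, interval_size):
--     """Returns the acceptable hours given an end hour and interval size.
--     This means if our interval size is 720 minutes we will only return a row
--     every 6 hours"""
--
--     acceptable_hours = []
--
--     if interval_size<=60:
--         return list(range(1, 24))
--     else:
--         interval_jump = int(round(interval_size/60, 0))
--
--         start_point = end_hour
--
--         while((start_point-interval_jump)>=0):
--             start_point = start_point - interval_jump
--
--         while(start_point<24):
--
--             acceptable_hours.append(start_point)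
--
--             start_point += interval_jump
--
--         return acceptable_hours
-- ===== SOURCE B (Python) =====
-- def acceptable_hour_values(end_hour, interval_size):
--     """Returns the acceptable hours given an end hour and interval size.
--     This means if our interval size is 720 minutes we will only return a row
--     every 6 hours"""
--     if interval_size <= 60:
--         return list(range(1, 24))
--     jump = int(round(interval_size / 60, 0))
--     return list(range(end_hour % jump, 24, jump))
-- ===== Notes on version B (the rewrite author's own statement) =====
-- stated objective: simpler
-- what changed: Both of A's while-loops are replaced by a single modulo expression and one range() call: the start offset is end_hour % jump and the hours are the arithmetic progression range(start, 24, jump).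
-- intended difference: For end_hour < 0 with interval_size > 60, A never normalises the start point and returns a list beginning with negative values (e.g. [-5, -3, ...] for end_hour=-5), while B returns the grid of hours within 0..23 ([1, 3, ...]), which is the intended meaning of acceptable hours. — e.g. on acceptable_hour_values(-5, 120): A returns [-5, -3, -1, 1, 3, 5, 7, 9, 11, 13, 15, 17, 19, 21, 23], B returns [1, 3, 5, 7, 9, 11, 13, 15, 17, 19, 21, 23]
import Mathlib
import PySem

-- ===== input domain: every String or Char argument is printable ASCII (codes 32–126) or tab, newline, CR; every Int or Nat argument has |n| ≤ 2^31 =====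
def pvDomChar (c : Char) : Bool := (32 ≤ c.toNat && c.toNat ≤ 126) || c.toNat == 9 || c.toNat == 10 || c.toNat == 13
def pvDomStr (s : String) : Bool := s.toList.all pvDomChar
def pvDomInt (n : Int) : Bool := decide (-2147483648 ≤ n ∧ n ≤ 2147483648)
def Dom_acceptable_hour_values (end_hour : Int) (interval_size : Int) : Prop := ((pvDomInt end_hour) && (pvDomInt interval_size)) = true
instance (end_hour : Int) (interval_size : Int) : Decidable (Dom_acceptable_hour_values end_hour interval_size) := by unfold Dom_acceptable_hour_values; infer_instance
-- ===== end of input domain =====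

-- B replaces A's repeated-subtraction loop and append loop by a modulo offset and one
-- range() call (objective: simpler); for negative end_hour (with interval_size > 60) A
-- returns negative "hours", B the intended grid of hours in 0..23 (see D_ below).


-- shared helper: int(round(interval_size/60, 0)) — Python rounds the float half-to-even.
-- Exact integer half-to-even rounding of interval_size/60; this agrees with the float
-- computation for every |interval_size| ≤ 2^31 (the quotient is far below 2^52, the only
-- exact-half cases are exactly representable doubles, and otherwise the quotient is at
-- least 1/60 from a half-integer while the float error is < 2^-25).
def pyRound60 (n : Int) : Int :=
  let q := PySem.Int.floordiv n 60
  let r := PySem.Int.mod n 60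
  if 2 * r < 60 then q
  else if 60 < 2 * r then q + 1
  else if PySem.Int.mod q 2 = 0 then q else q + 1

-- ===== PORT A =====
-- while (start_point - interval_jump) >= 0: start_point -= interval_jump
-- (the '1 ≤ jump' conjunct is a totality guard only; A's else branch always has jump ≥ 1)
def ahvSubLoop (start jump : Int) : Int :=
  if h₀ : 1 ≤ jump ∧ 0 ≤ start - jump then ahvSubLoop (start - jump) jump else start
termination_by start.toNat
decreasing_by
  obtain ⟨h1, h2⟩ := h₀; omega

-- while start_point < 24: acceptable_hours.append(start_point); start_point += interval_jump
def ahvAppLoop (acc : List Int) (start jump : Int) : List Int :=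
  if h₀ : 1 ≤ jump ∧ start < 24 then ahvAppLoop (acc ++ [start]) (start + jump) jump else acc
termination_by (24 - start).toNat
decreasing_by
  obtain ⟨h1, h2⟩ := h₀; omega

def acceptable_hour_values (end_hour : Int) (interval_size : Int) : List Int :=
  if interval_size ≤ 60 then PySem.List.pyRange 1 24 1
  else
    let interval_jump := pyRound60 interval_size
    let start_point := ahvSubLoop end_hour interval_jump
    ahvAppLoop [] start_point interval_jump

-- ===== PORT B =====
-- list(range(end_hour % jump, 24, jump))
def acceptable_hour_values_alt (end_hour : Int) (interval_size : Int) : List Int :=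
  if interval_size ≤ 60 then PySem.List.pyRange 1 24 1
  else
    let jump := pyRound60 interval_size
    PySem.List.pyRange (PySem.Int.mod end_hour jump) 24 jump

-- ===== PRECONDITION & SPEC =====
-- For end_hour < 0 with interval_size > 60, A never normalises the start point and returns
-- a list beginning with negative values; B returns the intended grid of hours within 0..23,
-- which is what a list of "acceptable hours" must contain.
def D_acceptable_hour_values (end_hour : Int) (interval_size : Int) : Prop :=
  end_hour < 0 ∧ 60 < interval_size
instance (end_hour : Int) (interval_size : Int) : Decidable (D_acceptable_hour_values end_hour interval_size) := by unfold D_acceptable_hour_values; infer_instance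

def Spec_acceptable_hour_values (end_hour : Int) (interval_size : Int) (out : List Int) : Prop := ¬ D_acceptable_hour_values end_hour interval_size → out = acceptable_hour_values_alt end_hour interval_size
instance (end_hour : Int) (interval_size : Int) (out : List Int) : Decidable (Spec_acceptable_hour_values end_hour interval_size out) := by unfold Spec_acceptable_hour_values; infer_instance

def pvDiffWitness_acceptable_hour_values : Int × Int := (-5, 120)
def pvDiffWitnessOut_acceptable_hour_values : (List Int) × (List Int) :=
  ([-5, -3, -1, 1, 3, 5, 7, 9, 11, 13, 15, 17, 19, 21, 23],
   [1, 3, 5, 7, 9, 11, 13, 15, 17, 19, 21, 23])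

-- ===== CLAIM (what is proved, stated in full; the proofs are below) =====
def Claim_unchanged_acceptable_hour_values : Prop := ∀ (end_hour : Int) (interval_size : Int), Dom_acceptable_hour_values end_hour interval_size → Spec_acceptable_hour_values end_hour interval_size (acceptable_hour_values end_hour interval_size)
def Claim_changed_acceptable_hour_values : Prop := Dom_acceptable_hour_values (pvDiffWitness_acceptable_hour_values.1) (pvDiffWitness_acceptable_hour_values.2) ∧ D_acceptable_hour_values (pvDiffWitness_acceptable_hour_values.1) (pvDiffWitness_acceptable_hour_values.2) ∧ acceptable_hour_values (pvDiffWitness_acceptable_hour_values.1) (pvDiffWitness_acceptable_hour_values.2) = pvDiffWitnessOut_acceptable_hour_values.1 ∧ acceptable_hour_values_alt (pvDiffWitness_acceptable_hour_values.1) (pvDiffWitness_acceptable_hour_values.2) = pvDiffWitnessOut_acceptable_hour_values.2 ∧ pvDiffWitnessOut_acceptable_hour_values.1 ≠ pvDiffWitnessOut_acceptable_hour_values.2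
def Claim_exact_acceptable_hour_values : Prop := ∀ (end_hour : Int) (interval_size : Int), Dom_acceptable_hour_values end_hour interval_size → D_acceptable_hour_values end_hour interval_size → acceptable_hour_values end_hour interval_size ≠ acceptable_hour_values_alt end_hour interval_size

-- ===== LEMMAS AND PROOFS =====

theorem pyRound60_pos {n : Int} (hn : 60 < n) : 1 ≤ pyRound60 n := by
  have hq : 1 ≤ PySem.Int.floordiv n 60 := by
    rw [PySem.Int.le_floordiv_iff_mul_le (by norm_num)]; omega
  unfold pyRound60
  dsimp only
  split_ifs <;> omega

theorem ahvSubLoop_neg {start jump : Int} (h : start < 0) : ahvSubLoop start jump = start := by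
  rw [ahvSubLoop]
  rw [dif_neg]
  rintro ⟨h1, h2⟩; omega

theorem ahvSubLoop_emod {jump : Int} (hj : 1 ≤ jump) (n : Nat) :
    ∀ start : Int, 0 ≤ start → start.toNat = n → ahvSubLoop start jump = start % jump := by
  induction n using Nat.strongRecOn with
  | _ n ih =>
    intro start hs h
    rw [ahvSubLoop]
    by_cases hc : 0 ≤ start - jump
    · rw [dif_pos ⟨hj, hc⟩, ih (start - jump).toNat (by omega) _ (by omega) rfl,
        Int.sub_emod_right]
    · rw [dif_neg (by rintro ⟨h1, h2⟩; omega), Int.emod_eq_of_lt hs (by omega)]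

theorem ahvSubLoop_eq_mod {start jump : Int} (hj : 1 ≤ jump) (hs : 0 ≤ start) :
    ahvSubLoop start jump = PySem.Int.mod start jump := by
  rw [PySem.Int.mod_eq_emod_of_pos (b := jump) (by omega)]
  exact ahvSubLoop_emod hj start.toNat start hs rfl

theorem ahvAppLoop_acc (acc : List Int) (start jump : Int) :
    ahvAppLoop acc start jump = acc ++ ahvAppLoop [] start jump := by
  by_cases hj : 1 ≤ jump
  · induction h : (24 - start).toNat using Nat.strongRecOn generalizing acc start with
    | _ n ih =>
      conv_lhs => rw [ahvAppLoop]
      conv_rhs => rw [ahvAppLoop]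
      by_cases hc : start < 24
      · rw [dif_pos ⟨hj, hc⟩, dif_pos ⟨hj, hc⟩,
          ih (24 - (start + jump)).toNat (by omega) _ _ rfl,
          ih (24 - (start + jump)).toNat (by omega) ([] ++ [start]) _ rfl]
        simp
      · rw [dif_neg (by rintro ⟨h1, h2⟩; omega), dif_neg (by rintro ⟨h1, h2⟩; omega)]
        simp
  · conv_lhs => rw [ahvAppLoop]
    conv_rhs => rw [ahvAppLoop]
    rw [dif_neg (by rintro ⟨h1, h2⟩; omega), dif_neg (by rintro ⟨h1, h2⟩; omega)]
    simp

-- range(a, b, s) with 0 < s and a < b starts with a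
theorem pyRange_pos_cons {a b s : Int} (hs : 0 < s) (hab : a < b) :
    PySem.List.pyRange a b s = a :: PySem.List.pyRange (a + s) b s := by
  rw [PySem.List.pyRange_of_pos a b hs, PySem.List.pyRange_of_pos (a + s) b hs]
  have key : (if a < b then ((b - a + s - 1) / s).toNat else 0)
      = (if a + s < b then ((b - (a + s) + s - 1) / s).toNat else 0) + 1 := by
    rw [if_pos hab]
    by_cases h2 : a + s < b
    · rw [if_pos h2]
      have h3 : (b - a + s - 1) / s = (b - (a + s) + s - 1) / s + 1 := by
        have h4 := Int.add_mul_ediv_right (b - (a + s) + s - 1) 1 (by omega : s ≠ 0)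
        rw [one_mul] at h4
        rw [← h4]
        ring_nf
      have h5 : 0 ≤ (b - (a + s) + s - 1) / s := Int.ediv_nonneg (by omega) (by omega)
      omega
    · rw [if_neg h2]
      have h6 : (b - a + s - 1) / s = 1 := by
        have h4 := Int.add_mul_ediv_right (b - a - 1) 1 (by omega : s ≠ 0)
        rw [one_mul] at h4
        have h7 : (b - a - 1) / s = 0 := Int.ediv_eq_zero_of_lt (by omega) (by omega)
        have h8 : b - a + s - 1 = b - a - 1 + s := by ring
        rw [h8, h4, h7]
        ring
      rw [h6]
      decide
  rw [key, List.range_succ_eq_map]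
  simp only [List.map_cons, List.map_map, Int.natCast_zero, mul_zero, add_zero]
  congr 1
  apply List.map_congr_left
  intro k _
  simp only [Function.comp_apply, Nat.cast_succ]
  ring

theorem pyRange_pos_nil {a b s : Int} (hs : 0 < s) (hab : b ≤ a) :
    PySem.List.pyRange a b s = [] := by
  rw [PySem.List.pyRange_of_pos a b hs, if_neg (by omega)]
  simp

theorem ahvAppLoop_eq_pyRange {jump : Int} (hj : 1 ≤ jump) (start : Int) :
    ahvAppLoop [] start jump = PySem.List.pyRange start 24 jump := by
  induction h : (24 - start).toNat using Nat.strongRecOn generalizing start with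
  | _ n ih =>
    rw [ahvAppLoop]
    by_cases hc : start < 24
    · rw [dif_pos ⟨hj, hc⟩, ahvAppLoop_acc, ih (24 - (start + jump)).toNat (by omega) _ rfl,
        pyRange_pos_cons (by omega) hc]
      simp
    · rw [dif_neg (by rintro ⟨h1, h2⟩; omega), pyRange_pos_nil (by omega) (by omega)]

theorem mem_alt_nonneg {e jump x : Int} (hj : 1 ≤ jump)
    (hx : x ∈ PySem.List.pyRange (PySem.Int.mod e jump) 24 jump) : 0 ≤ x := by
  rw [PySem.List.mem_pyRange_iff_of_pos (by omega)] at hx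
  have h0 : 0 ≤ PySem.Int.mod e jump := by
    rw [PySem.Int.mod_eq_emod_of_pos (by omega)]
    exact Int.emod_nonneg _ (by omega)
  omega

-- ===== VERDICT (by name: the statement is the Claim_ definition above) =====
theorem acceptable_hour_values_spec : Claim_unchanged_acceptable_hour_values := by
  intro e i _ hD
  unfold acceptable_hour_values acceptable_hour_values_alt
  by_cases hle : i ≤ 60
  · rw [if_pos hle, if_pos hle]
  · rw [if_neg hle, if_neg hle]
    have he : 0 ≤ e := by
      by_contra hx
      exact hD ⟨by omega, by omega⟩
    have hj : 1 ≤ pyRound60 i := pyRound60_pos (by omega)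
    dsimp only
    rw [ahvSubLoop_eq_mod hj he, ahvAppLoop_eq_pyRange hj]

theorem acceptable_hour_values_changed : Claim_changed_acceptable_hour_values := by
  unfold Claim_changed_acceptable_hour_values
  refine ⟨by decide, by decide, ?_, by decide, by decide⟩
  show acceptable_hour_values (-5) 120 = [-5, -3, -1, 1, 3, 5, 7, 9, 11, 13, 15, 17, 19, 21, 23]
  unfold acceptable_hour_values
  rw [if_neg (by decide)]
  show ahvAppLoop [] (ahvSubLoop (-5) (pyRound60 120)) (pyRound60 120) = _
  have hj : pyRound60 120 = 2 := by decide
  rw [hj, ahvSubLoop_neg (by decide), ahvAppLoop_eq_pyRange (by decide)]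
  decide

theorem acceptable_hour_values_tight : Claim_exact_acceptable_hour_values := by
  intro e i _ hD heq
  obtain ⟨he, hi⟩ := hD
  have hj : 1 ≤ pyRound60 i := pyRound60_pos hi
  unfold acceptable_hour_values acceptable_hour_values_alt at heq
  rw [if_neg (by omega), if_neg (by omega)] at heq
  dsimp only at heq
  rw [ahvSubLoop_neg he] at heq
  have hmem : e ∈ ahvAppLoop [] e (pyRound60 i) := by
    rw [ahvAppLoop]
    rw [dif_pos ⟨hj, by omega⟩, ahvAppLoop_acc]
    simp
  rw [heq] at hmem
  exact absurd (mem_alt_nonneg hj hmem) (by omega)
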